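-- pv_equiv track=rewrite | github.com/fanshaoze/LeetcodeClassicAlgorithms | ToOffer/Tree.py | digit_at_index
-- ===== SOURCE A (Python) =====
-- def digit_at_index(index):
--     if index < 0:
--         return None
--     digits = 1
--     while True:
--         numbers = 10 if digits == 1 else 9 * 10 ** (digits - 1)
--         if index < numbers * digits:
--             number = (10 ** (digits - 1) if digits != 1 else 0) + index // digits
--             right_index = digits - index % digits
--             for i in range(0, right_index - 1):
--                 number = number // 10
--             return number % 10
--         index -= digits * numbers
--         digits += 1
-- ===== SOURCE B (Python) =====
-- def _prefix_len(n):
--     # total characters in "0" + "1" + ... + str(n - 1)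
--     if n <= 0:
--         return 0
--     total = n
--     p = 10
--     while p < n:
--         total += n - p
--         p *= 10
--     return total
--
--
-- def _ndigits(n):
--     d = 1
--     while n >= 10:
--         n //= 10
--         d += 1
--     return d
--
--
-- def digit_at_index(index):
--     if index < 0:
--         return None
--     lo, hi = 0, index + 1
--     while lo + 1 < hi:
--         mid = (lo + hi) // 2
--         if _prefix_len(mid) <= index:
--             lo = mid
--         else:
--             hi = mid
--     offset = index - _prefix_len(lo)
--     d = _ndigits(lo)
--     return lo // 10 ** (d - 1 - offset) % 10
-- ===== Notes on version B (the rewrite author's own statement) =====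
-- stated objective: alternative
-- what changed: Replaces A's incremental subtraction of digit-length blocks (and its repeated-division inner loop) by a binary search for the number containing the index, using a closed-form prefix character-count prefix_len(n) = n + sum of (n - 10^k) over 10^k < n, then extracts the digit arithmetically.
import Mathlib
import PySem

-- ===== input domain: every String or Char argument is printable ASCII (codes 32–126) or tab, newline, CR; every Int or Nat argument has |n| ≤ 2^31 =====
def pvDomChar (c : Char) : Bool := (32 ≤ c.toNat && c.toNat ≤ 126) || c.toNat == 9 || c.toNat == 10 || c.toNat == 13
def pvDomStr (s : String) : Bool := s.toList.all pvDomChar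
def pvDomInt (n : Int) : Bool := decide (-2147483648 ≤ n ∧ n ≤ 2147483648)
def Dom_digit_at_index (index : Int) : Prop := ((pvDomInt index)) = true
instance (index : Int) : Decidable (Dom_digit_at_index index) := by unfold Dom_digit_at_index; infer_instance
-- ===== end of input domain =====

-- B replaces A's incremental digit-length block subtraction by a binary search for the number
-- containing the index, using a closed-form count of characters before a number (objective: alternative).

-- ===== PORT A =====
-- termination measures for the ports (cited by name in decreasing_by)
theorem aloop_dec (index : Int) (digits : Nat)
    (h : ¬ index < (if digits = 1 then (10:Int) else 9 * 10 ^ (digits - 1)) * digits)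
    (hd : 0 < digits) :
    (index - (digits : Int) * (if digits = 1 then (10:Int) else 9 * 10 ^ (digits - 1))).toNat <
      index.toNat := by
  simp only [not_lt] at h
  have hp : (0:Int) < 10 ^ (digits - 1) := by positivity
  have h1 : (1:Int) ≤ (if digits = 1 then (10:Int) else 9 * 10 ^ (digits - 1)) * digits := by
    split <;> nlinarith
  have h2 : (digits : Int) * (if digits = 1 then (10:Int) else 9 * 10 ^ (digits - 1)) =
      (if digits = 1 then (10:Int) else 9 * 10 ^ (digits - 1)) * digits := mul_comm _ _
  omega

theorem ndigitsGo_dec (n : Int) (h : 10 ≤ n) :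
    (PySem.Int.floordiv n 10).toNat < n.toNat := by
  rw [PySem.Int.floordiv_eq_ediv_of_pos (by norm_num : (0:Int) < 10)]
  omega

theorem prefixGo_dec (n p : Int) (h : p < n) (hp : 0 < p) :
    (n - p * 10).toNat < (n - p).toNat := by omega

theorem bsGo_dec_left (lo hi : Int) (h : lo + 1 < hi) :
    (hi - PySem.Int.floordiv (lo + hi) 2).toNat < (hi - lo).toNat := by
  rw [PySem.Int.floordiv_eq_ediv_of_pos (by norm_num : (0:Int) < 2)]
  omega

theorem bsGo_dec_right (lo hi : Int) (h : lo + 1 < hi) :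
    (PySem.Int.floordiv (lo + hi) 2 - lo).toNat < (hi - lo).toNat := by
  rw [PySem.Int.floordiv_eq_ediv_of_pos (by norm_num : (0:Int) < 2)]
  omega

-- the 'while True' loop of A: state (index, digits); digits starts at 1 and only grows
def aloop (index : Int) (digits : Nat) : Int :=
  let numbers : Int := if digits = 1 then 10 else 9 * 10 ^ (digits - 1)
  if index < numbers * digits then
    let number : Int := (if digits ≠ 1 then (10:Int) ^ (digits - 1) else 0) +
      PySem.Int.floordiv index (digits : Int)
    let rightIndex : Int := (digits : Int) - PySem.Int.mod index (digits : Int)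
    -- for i in range(0, right_index - 1): number = number // 10
    let number2 : Int := (PySem.List.pyRange 0 (rightIndex - 1) 1).foldl
      (fun m _ => PySem.Int.floordiv m 10) number
    PySem.Int.mod number2 10
  else if _h : 0 < digits then
    aloop (index - (digits : Int) * numbers) (digits + 1)
  else 0  -- unreachable totality guard: digits starts at 1 and only increases
  termination_by index.toNat
  decreasing_by
    rename_i hlt
    exact aloop_dec index digits hlt _h

def digit_at_index (index : Int) : Option Int :=
  if index < 0 then none else some (aloop index 1)

-- ===== PORT B =====
-- _ndigits: d = 1; while n >= 10: n //= 10; d += 1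
def ndigitsGo (n d : Int) : Int :=
  if 10 ≤ n then ndigitsGo (PySem.Int.floordiv n 10) (d + 1) else d
  termination_by n.toNat
  decreasing_by
    rename_i h
    exact ndigitsGo_dec n h

def ndigits (n : Int) : Int := ndigitsGo n 1

-- _prefix_len: total = n; p = 10; while p < n: total += n - p; p *= 10
def prefixGo (n p total : Int) : Int :=
  if p < n then
    if _h : 0 < p then prefixGo n (p * 10) (total + (n - p)) else total
  else total
  termination_by (n - p).toNat
  decreasing_by
    rename_i hlt
    exact prefixGo_dec n p hlt _h

def prefixLen (n : Int) : Int :=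
  if n ≤ 0 then 0 else prefixGo n 10 n

-- the binary-search loop: while lo + 1 < hi: mid = (lo + hi) // 2; …
def bsGo (index lo hi : Int) : Int :=
  if lo + 1 < hi then
    let mid := PySem.Int.floordiv (lo + hi) 2
    if prefixLen mid ≤ index then bsGo index mid hi else bsGo index lo mid
  else lo
  termination_by (hi - lo).toNat
  decreasing_by
    · rename_i hlt _
      exact bsGo_dec_left lo hi hlt
    · rename_i hlt _
      exact bsGo_dec_right lo hi hlt

def digit_at_index_alt (index : Int) : Option Int :=
  if index < 0 then none
  else
    let lo := bsGo index 0 (index + 1)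
    let offset := index - prefixLen lo
    let d := ndigits lo
    some (PySem.Int.mod (PySem.Int.floordiv lo ((10:Int) ^ (d - 1 - offset).toNat)) 10)

-- ===== PRECONDITION & SPEC =====
def Spec_digit_at_index (index : Int) (out : Option Int) : Prop := out = digit_at_index_alt index
instance (index : Int) (out : Option Int) : Decidable (Spec_digit_at_index index out) := by unfold Spec_digit_at_index; infer_instance

-- ===== CLAIM (what is proved, stated in full; the proofs are below) =====
def Claim_equal_digit_at_index : Prop := ∀ (index : Int), Dom_digit_at_index index → Spec_digit_at_index index (digit_at_index index)

-- ===== LEMMAS AND PROOFS =====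

-- first number with dg digits (0 counts as the first 1-digit number, as in A)
def baseN (dg : Nat) : Int := if dg = 1 then 0 else 10 ^ (dg - 1)
-- how many numbers have dg digits
def cntN (dg : Nat) : Int := if dg = 1 then 10 else 9 * 10 ^ (dg - 1)
-- characters contributed by all numbers of up to dg digits
def cumC : Nat → Int
  | 0 => 0
  | dg + 1 => cumC dg + cntN (dg + 1) * (dg + 1)

theorem cntN_pos (dg : Nat) : 0 < cntN dg := by
  unfold cntN; split
  · norm_num
  · positivity

theorem base_add_cnt (dg : Nat) (h : 1 ≤ dg) : baseN dg + cntN dg = 10 ^ dg := by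
  unfold baseN cntN
  split_ifs with h1
  · subst h1; norm_num
  · have h2 : dg - 1 + 1 = dg := by omega
    calc (10:Int) ^ (dg - 1) + 9 * 10 ^ (dg - 1) = 10 ^ (dg - 1) * 10 := by ring
    _ = 10 ^ dg := by rw [← pow_succ, h2]

theorem ndigitsGo_eq (k : Nat) : ∀ (n d : Int), (10:Int) ^ k ≤ n → n < 10 ^ (k + 1) →
    ndigitsGo n d = d + k := by
  induction k with
  | zero =>
    intro n d hl hr
    rw [ndigitsGo, if_neg (by norm_num at hr ⊢; omega)]
    simp
  | succ k ih =>
    intro n d hl hr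
    have h10 : (10:Int) ≤ n := by
      have : (10:Int) ^ 1 ≤ 10 ^ (k + 1) := pow_le_pow_right₀ (by norm_num) (by omega)
      simpa using this.trans hl
    rw [ndigitsGo, if_pos h10, PySem.Int.floordiv_eq_ediv_of_pos (by norm_num : (0:Int) < 10)]
    rw [ih (n / 10) (d + 1) ?_ ?_]
    · push_cast; ring
    · rw [Int.le_ediv_iff_mul_le (by norm_num)]
      calc (10:Int) ^ k * 10 = 10 ^ (k + 1) := by rw [pow_succ]
      _ ≤ n := hl
    · rw [Int.ediv_lt_iff_lt_mul (by norm_num)]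
      calc n < 10 ^ (k + 1 + 1) := hr
      _ = 10 ^ (k + 1) * 10 := by rw [pow_succ]

theorem ndigits_of_bounds (dg : Nat) (h1 : 1 ≤ dg) (n : Int)
    (hlo : baseN dg ≤ n) (hhi : n < 10 ^ dg) : ndigits n = (dg : Int) := by
  unfold ndigits
  by_cases hd : dg = 1
  · subst hd
    unfold baseN at hlo
    rw [ndigitsGo, if_neg (by norm_num at hlo hhi ⊢; omega)]
    norm_num
  · have h2 : 2 ≤ dg := by omega
    have hb : baseN dg = 10 ^ (dg - 1) := by unfold baseN; rw [if_neg hd]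
    have h3 : dg - 1 + 1 = dg := by omega
    rw [ndigitsGo_eq (dg - 1) n 1 (by rw [← hb]; exact hlo) (by rw [h3]; exact hhi)]
    omega

-- sum characterisation of prefixGo
def sumTail (n p : Int) (e : Nat) : Int :=
  (Finset.range e).sum (fun j => max 0 (n - p * 10 ^ j))

theorem prefixGo_eq (e : Nat) : ∀ (n p total : Int), 0 < p → n ≤ p * 10 ^ e →
    prefixGo n p total = total + sumTail n p e := by
  induction e with
  | zero =>
    intro n p total hp hub
    rw [prefixGo, if_neg (by simp at hub; omega)]
    simp [sumTail]
  | succ e ih =>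
    intro n p total hp hub
    by_cases hpn : p < n
    · rw [prefixGo, if_pos hpn, dif_pos hp]
      rw [ih n (p * 10) (total + (n - p)) (by positivity)
        (by calc n ≤ p * 10 ^ (e + 1) := hub
            _ = p * 10 * 10 ^ e := by ring)]
      have hsum : sumTail n p (e + 1) = (n - p) + sumTail n (p * 10) e := by
        unfold sumTail
        rw [Finset.sum_range_succ']
        have h0 : max 0 (n - p * 10 ^ 0) = n - p := by
          rw [max_eq_right (by simp; omega)]; ring_nf
        rw [h0, add_comm]
        congr 1
        exact Finset.sum_congr rfl fun j _ => by ring_nf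
      rw [hsum]; ring
    · rw [prefixGo, if_neg hpn]
      have hz : sumTail n p (e + 1) = 0 := by
        unfold sumTail
        apply Finset.sum_eq_zero
        intro j _
        have h1 : (1:Int) ≤ 10 ^ j := one_le_pow₀ (by norm_num)
        have h2 : p ≤ p * 10 ^ j := le_mul_of_one_le_right hp.le h1
        rw [max_eq_left (by omega)]
      rw [hz]; ring

theorem prefixLen_eq (e : Nat) (n : Int) (h0 : 0 ≤ n) (hub : n ≤ 10 * 10 ^ e) :
    prefixLen n = n + sumTail n 10 e := by
  unfold prefixLen
  split_ifs with h
  · have hn : n = 0 := by omega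
    subst hn
    have hz : sumTail 0 10 e = 0 := by
      unfold sumTail
      apply Finset.sum_eq_zero
      intro j _
      have h1 : (1:Int) ≤ 10 ^ j := one_le_pow₀ (by norm_num)
      rw [max_eq_left (by omega)]
    rw [hz]; ring
  · exact prefixGo_eq e n 10 n (by norm_num) hub

theorem int_le_pow10 (n : Int) : n ≤ 10 * 10 ^ n.toNat := by
  by_cases h : n ≤ 0
  · have : (0:Int) < 10 * 10 ^ n.toNat := by positivity
    omega
  · have h : 0 < n := by omega
    have h1 : (n.toNat : Int) = n := Int.toNat_of_nonneg h.le
    have h2 : n.toNat < 10 ^ n.toNat := Nat.lt_pow_self (by norm_num)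
    have h3 : ((10:Nat) ^ n.toNat : Int) = (10:Int) ^ n.toNat := by push_cast; ring
    have h4 : (n.toNat : Int) < (10:Int) ^ n.toNat := by
      rw [← h3]; exact_mod_cast h2
    have h5 : (0:Int) < 10 ^ n.toNat := by positivity
    omega

theorem prefixLen_mono (m n : Int) (h0 : 0 ≤ m) (hmn : m ≤ n) :
    prefixLen m ≤ prefixLen n := by
  have hub : n ≤ 10 * 10 ^ n.toNat := int_le_pow10 n
  rw [prefixLen_eq n.toNat m h0 (by omega), prefixLen_eq n.toNat n (by omega) hub]
  apply add_le_add hmn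
  unfold sumTail
  exact Finset.sum_le_sum fun j _ => max_le_max le_rfl (by omega)

theorem self_le_prefixLen (n : Int) (h0 : 0 ≤ n) : n ≤ prefixLen n := by
  rw [prefixLen_eq n.toNat n h0 (int_le_pow10 n)]
  have : 0 ≤ sumTail n 10 n.toNat :=
    Finset.sum_nonneg fun j _ => le_max_left _ _
  omega

-- sum of the powers 10^1 .. 10^k
def spow (k : Nat) : Int := (Finset.range k).sum (fun j => (10:Int) ^ (j + 1))

theorem cumC_closed : ∀ (k : Nat), ((k + 1 : Nat) : Int) * baseN (k + 1) - spow k = cumC k := by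
  intro k
  induction k with
  | zero => simp [baseN, spow, cumC]
  | succ k ih =>
    have hb : baseN (k + 2) = 10 ^ (k + 1) := by
      unfold baseN; rw [if_neg (by omega)]; congr 1
    have hbc : baseN (k + 1) + cntN (k + 1) = 10 ^ (k + 1) := base_add_cnt (k + 1) (by omega)
    have hs : spow (k + 1) = spow k + 10 ^ (k + 1) := by
      unfold spow; rw [Finset.sum_range_succ]
    have hc : cumC (k + 1) = cumC k + cntN (k + 1) * (k + 1) := rfl
    rw [hb, hs, hc, ← ih]
    push_cast
    first
    | linear_combination ((k : Int) + 1) * hbc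
    | linear_combination (2 * ((k : Int) + 1)) * hbc
    | nlinarith [hbc]

theorem prefixLen_block (dg : Nat) (h1 : 1 ≤ dg) (q : Int) (hq0 : 0 ≤ q) (hq : q ≤ cntN dg) :
    prefixLen (baseN dg + q) = cumC (dg - 1) + q * dg := by
  have hbc : baseN dg + cntN dg = 10 ^ dg := base_add_cnt dg h1
  have hb0 : 0 ≤ baseN dg := by unfold baseN; split <;> positivity
  have h3 : dg - 1 + 1 = dg := by omega
  have hten : (10:Int) * 10 ^ (dg - 1) = 10 ^ dg := by rw [← pow_succ', h3]
  have hub : baseN dg + q ≤ 10 * 10 ^ (dg - 1) := by rw [hten]; omega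
  rw [prefixLen_eq (dg - 1) (baseN dg + q) (by omega) hub]
  have hterm : ∀ j ∈ Finset.range (dg - 1),
      max 0 (baseN dg + q - 10 * 10 ^ j) = (baseN dg + q) - (10:Int) ^ (j + 1) := by
    intro j hj
    simp only [Finset.mem_range] at hj
    have hdg2 : ¬ (dg = 1) := by omega
    have hbse : baseN dg = 10 ^ (dg - 1) := by unfold baseN; rw [if_neg hdg2]
    have hle : (10:Int) ^ (j + 1) ≤ 10 ^ (dg - 1) :=
      pow_le_pow_right₀ (by norm_num) (by omega)
    have hp : (10:Int) * 10 ^ j = 10 ^ (j + 1) := by rw [← pow_succ']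
    rw [hp, max_eq_right (by omega)]
  have hsum : sumTail (baseN dg + q) 10 (dg - 1) =
      ((dg - 1 : Nat) : Int) * (baseN dg + q) - spow (dg - 1) := by
    unfold sumTail spow
    calc ∑ j ∈ Finset.range (dg - 1), max 0 (baseN dg + q - 10 * 10 ^ j)
        = ∑ j ∈ Finset.range (dg - 1), ((baseN dg + q) - (10:Int) ^ (j + 1)) :=
          Finset.sum_congr rfl hterm
      _ = ∑ _j ∈ Finset.range (dg - 1), (baseN dg + q)
            - ∑ j ∈ Finset.range (dg - 1), (10:Int) ^ (j + 1) := by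
          rw [Finset.sum_sub_distrib]
      _ = ((dg - 1 : Nat) : Int) * (baseN dg + q)
            - ∑ j ∈ Finset.range (dg - 1), (10:Int) ^ (j + 1) := by
          rw [Finset.sum_const, Finset.card_range, nsmul_eq_mul]
  rw [hsum]
  have hclosed := cumC_closed (dg - 1)
  rw [h3] at hclosed
  have hcast : ((dg - 1 : Nat) : Int) = (dg : Int) - 1 := by push_cast [h1]; ring
  rw [hcast] at *
  linear_combination hclosed

theorem bsGo_spec (index lo hi : Int) : 0 ≤ lo → lo < hi →
    prefixLen lo ≤ index → index < prefixLen hi →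
    0 ≤ bsGo index lo hi ∧ prefixLen (bsGo index lo hi) ≤ index ∧
      index < prefixLen (bsGo index lo hi + 1) := by
  fun_induction bsGo index lo hi with
  | case1 lo hi hcnd mid hmid ih =>
    intro h0 hlh hlo hhi
    have hm : mid = (lo + hi) / 2 := PySem.Int.floordiv_eq_ediv_of_pos (by norm_num)
    exact ih (by omega) (by omega) hmid hhi
  | case2 lo hi hcnd mid hmid ih =>
    intro h0 hlh hlo hhi
    have hm : mid = (lo + hi) / 2 := PySem.Int.floordiv_eq_ediv_of_pos (by norm_num)
    exact ih h0 (by omega) hlo (by omega)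
  | case3 lo hi hcnd =>
    intro h0 hlh hlo hhi
    have : hi = lo + 1 := by omega
    subst this
    exact ⟨h0, hlo, hhi⟩

theorem foldl_div_pow (l : List Int) : ∀ (x : Int), 0 ≤ x →
    l.foldl (fun m _ => PySem.Int.floordiv m 10) x =
      PySem.Int.floordiv x ((10:Int) ^ l.length) := by
  induction l with
  | nil =>
    intro x _
    simp only [List.foldl_nil, List.length_nil, pow_zero,
      PySem.Int.floordiv_eq_ediv_of_pos (show (0:Int) < 1 by norm_num), Int.ediv_one]
  | cons a l ih =>
    intro x hx
    rw [List.foldl_cons,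
      ih (PySem.Int.floordiv x 10)
        (by rw [PySem.Int.floordiv_eq_ediv_of_pos (show (0:Int) < 10 by norm_num)]
            exact Int.ediv_nonneg hx (by norm_num)),
      List.length_cons]
    rw [PySem.Int.floordiv_eq_ediv_of_pos (show (0:Int) < 10 by norm_num),
      PySem.Int.floordiv_eq_ediv_of_pos (show (0:Int) < (10:Int) ^ l.length by positivity),
      PySem.Int.floordiv_eq_ediv_of_pos (show (0:Int) < (10:Int) ^ (l.length + 1) by positivity)]
    rw [Int.ediv_ediv_of_nonneg (show (0:Int) ≤ 10 by norm_num)]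
    rw [← pow_succ']

theorem cumC_nonneg (dg : Nat) : 0 ≤ cumC dg := by
  induction dg with
  | zero => simp [cumC]
  | succ k ih =>
    have := cntN_pos (k + 1)
    have : (0:Int) ≤ cntN (k + 1) * (k + 1) := by positivity
    show 0 ≤ cumC k + cntN (k + 1) * (k + 1)
    omega

-- A's value on the returning branch
theorem aloop_return (dg : Nat) (h1 : 1 ≤ dg) (i : Int) (hi0 : 0 ≤ i)
    (hi : i < cntN dg * dg) :
    aloop i dg = PySem.Int.mod (PySem.Int.floordiv (baseN dg + PySem.Int.floordiv i (dg : Int))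
      ((10:Int) ^ (((dg : Int) - 1 - PySem.Int.mod i (dg : Int)).toNat))) 10 := by
  have hc : i < (if dg = 1 then (10:Int) else 9 * 10 ^ (dg - 1)) * dg := by
    unfold cntN at hi; exact hi
  conv_lhs => rw [aloop.eq_def]
  simp only [if_pos hc]
  have hdgp : (0:Int) < (dg : Int) := by exact_mod_cast h1
  have hx0 : (0:Int) ≤ (if ¬ dg = 1 then (10:Int) ^ (dg - 1) else 0) +
      PySem.Int.floordiv i (dg : Int) := by
    rw [PySem.Int.floordiv_eq_ediv_of_pos hdgp]
    have hq := Int.ediv_nonneg hi0 hdgp.le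
    have hp : (0:Int) ≤ 10 ^ (dg - 1) := by positivity
    split <;> omega
  rw [foldl_div_pow _ _ hx0, PySem.List.length_pyRange_one]
  have hbase : (if ¬ dg = 1 then (10:Int) ^ (dg - 1) else 0) = baseN dg := by
    unfold baseN; split_ifs <;> tauto
  have hexp : ((dg : Int) - PySem.Int.mod i (dg : Int) - 1 - 0).toNat =
      ((dg : Int) - 1 - PySem.Int.mod i (dg : Int)).toNat := by congr 1; ring
  rw [hbase, hexp]

-- B's value at a global index inside the dg-digit block
theorem prefixLen_zero : prefixLen 0 = 0 := by norm_num [prefixLen]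

theorem alt_block (dg : Nat) (h1 : 1 ≤ dg) (rem : Int) (hr0 : 0 ≤ rem)
    (hr : rem < cntN dg * dg) :
    digit_at_index_alt (cumC (dg - 1) + rem) =
      some (PySem.Int.mod (PySem.Int.floordiv (baseN dg + PySem.Int.floordiv rem (dg : Int))
        ((10:Int) ^ (((dg : Int) - 1 - PySem.Int.mod rem (dg : Int)).toNat))) 10) := by
  have hg0 : 0 ≤ cumC (dg - 1) + rem := add_nonneg (cumC_nonneg _) hr0
  have hdg : (0:Int) < (dg : Int) := by exact_mod_cast h1
  have hfl : PySem.Int.floordiv rem (dg : Int) = rem / (dg : Int) :=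
    PySem.Int.floordiv_eq_ediv_of_pos hdg
  have hmd : PySem.Int.mod rem (dg : Int) = rem % (dg : Int) :=
    PySem.Int.mod_eq_emod_of_pos hdg
  have hb0 : 0 ≤ baseN dg := by unfold baseN; split <;> positivity
  have hbc : baseN dg + cntN dg = 10 ^ dg := base_add_cnt dg h1
  -- the number the index falls in, and the offset inside it
  have hq0 : 0 ≤ rem / (dg : Int) := Int.ediv_nonneg hr0 hdg.le
  have hqlt : rem / (dg : Int) < cntN dg := by
    rw [Int.ediv_lt_iff_lt_mul hdg]; exact hr
  have hdm := Int.ediv_add_emod rem (dg : Int)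
  have hr0' : 0 ≤ rem % (dg : Int) := Int.emod_nonneg rem (by omega)
  have hrlt : rem % (dg : Int) < (dg : Int) := Int.emod_lt_of_pos rem hdg
  have hP1 : prefixLen (baseN dg + rem / (dg : Int)) =
      cumC (dg - 1) + (rem / (dg : Int)) * dg :=
    prefixLen_block dg h1 _ hq0 hqlt.le
  have hP2 : prefixLen (baseN dg + rem / (dg : Int) + 1) =
      cumC (dg - 1) + (rem / (dg : Int) + 1) * dg := by
    have harr : baseN dg + rem / (dg : Int) + 1 = baseN dg + (rem / (dg : Int) + 1) := by ring
    rw [harr]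
    exact prefixLen_block dg h1 _ (by omega) (by omega)
  -- the binary search returns exactly that number
  have hspec := bsGo_spec (cumC (dg - 1) + rem) 0 (cumC (dg - 1) + rem + 1) le_rfl
    (by omega) (by rw [prefixLen_zero]; omega)
    (by have := self_le_prefixLen (cumC (dg - 1) + rem + 1) (by omega); omega)
  obtain ⟨hbs0, hbs1, hbs2⟩ := hspec
  have heq : bsGo (cumC (dg - 1) + rem) 0 (cumC (dg - 1) + rem + 1) =
      baseN dg + rem / (dg : Int) := by
    set r := bsGo (cumC (dg - 1) + rem) 0 (cumC (dg - 1) + rem + 1) with hrdef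
    rcases lt_trichotomy r (baseN dg + rem / (dg : Int)) with hlt | heq | hgt
    · exfalso
      have hmono := prefixLen_mono (r + 1) (baseN dg + rem / (dg : Int)) (by omega) (by omega)
      rw [hP1] at hmono
      have hcm : rem / (dg : Int) * (dg : Int) = (dg : Int) * (rem / (dg : Int)) :=
        mul_comm _ _
      omega
    · exact heq
    · exfalso
      have hmono := prefixLen_mono (baseN dg + rem / (dg : Int) + 1) r (by omega) (by omega)
      rw [hP2] at hmono
      have hcm : (rem / (dg : Int) + 1) * (dg : Int) =
          (dg : Int) * (rem / (dg : Int)) + (dg : Int) := by ring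
      omega
  have hnd : ndigits (baseN dg + rem / (dg : Int)) = (dg : Int) :=
    ndigits_of_bounds dg h1 _ (by omega) (by omega)
  -- evaluate B
  simp only [digit_at_index_alt, if_neg (show ¬ (cumC (dg - 1) + rem < 0) by omega)]
  rw [heq, hnd, hP1, hfl, hmd]
  have hoff : cumC (dg - 1) + rem - (cumC (dg - 1) + rem / (dg : Int) * (dg : Int)) =
      rem % (dg : Int) := by
    have hcm : rem / (dg : Int) * (dg : Int) = (dg : Int) * (rem / (dg : Int)) :=
      mul_comm _ _
    omega
  rw [hoff]

theorem cumC_succ (dg : Nat) (h1 : 1 ≤ dg) :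
    cumC dg = cumC (dg - 1) + cntN dg * dg := by
  obtain ⟨k, rfl⟩ : ∃ k, dg = k + 1 := ⟨dg - 1, by omega⟩
  simp [cumC]

theorem main_loop (iN : Nat) (dg : Nat) (h1 : 1 ≤ dg) :
    digit_at_index_alt ((iN : Int) + cumC (dg - 1)) = some (aloop (iN : Int) dg) := by
  induction iN using Nat.strong_induction_on generalizing dg with
  | _ iN ih =>
    by_cases hlt : (iN : Int) < cntN dg * dg
    · rw [aloop_return dg h1 iN (Int.natCast_nonneg iN) hlt,
        add_comm ((iN : Int)) (cumC (dg - 1)),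
        alt_block dg h1 iN (Int.natCast_nonneg iN) hlt]
    · simp only [not_lt] at hlt
      have hcpos : (0:Int) < cntN dg * dg := by
        have := cntN_pos dg
        have hdg : (0:Int) < (dg : Int) := by exact_mod_cast h1
        positivity
      have hcnn := Int.toNat_of_nonneg hcpos.le
      have hle : (cntN dg * dg).toNat ≤ iN := by omega
      have hat1 : ¬ ((iN : Int) < (if dg = 1 then (10:Int) else 9 * 10 ^ (dg - 1)) * dg) := by
        have hcnt_eq : (if dg = 1 then (10:Int) else 9 * 10 ^ (dg - 1)) = cntN dg := rfl
        rw [hcnt_eq]; omega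
      conv_rhs => rw [aloop.eq_def]
      simp only [if_neg hat1, dif_pos (show 0 < dg by omega)]
      have harg : (iN : Int) - (dg : Int) * (if dg = 1 then (10:Int) else 9 * 10 ^ (dg - 1)) =
          ((iN - (cntN dg * dg).toNat : Nat) : Int) := by
        have hcnt_eq : (if dg = 1 then (10:Int) else 9 * 10 ^ (dg - 1)) = cntN dg := rfl
        rw [hcnt_eq, mul_comm]
        push_cast [hle]
        omega
      rw [harg]
      have hih := ih (iN - (cntN dg * dg).toNat) (by omega) (dg + 1) (by omega)
      simp only [Nat.add_sub_cancel] at hih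
      rw [← hih]
      congr 1
      rw [cumC_succ dg h1]
      push_cast [hle]
      omega

-- ===== VERDICT (by name: the statement is the Claim_ definition above) =====
theorem digit_at_index_spec : Claim_equal_digit_at_index := by
  intro index _
  unfold Spec_digit_at_index digit_at_index
  by_cases hneg : index < 0
  · simp [hneg, digit_at_index_alt]
  · have h0 : 0 ≤ index := by omega
    have hcast : ((index.toNat : Int)) = index := Int.toNat_of_nonneg h0
    have := main_loop index.toNat 1 (by norm_num)
    simp only [cumC, hcast, add_zero] at this
    simp [hneg, ← this]
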